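-- pv_equiv track=rewrite | github.com/TakaIshikawa/blueprint | src/blueprint/task_data_deletion_readiness.py | _required_safeguards
-- ===== SOURCE A (Python) =====
-- from typing import Any, Iterable, Literal, Mapping, TypeVar
--
-- DataDeletionSignal = Literal[
--     "hard_delete",
--     "purge",
--     "erasure",
--     "account_deletion",
--     "gdpr_deletion",
--     "tombstone",
--     "cascading_delete",
--     "retention_exception",
--     "backup_deletion",
--     "search_index_removal",
--     "analytics_removal",
--     "audit_evidence",
-- ]
--
-- DataDeletionSafeguard = Literal[
--     "dry_run_counts",
--     "cascade_inventory",
--     "backup_restore_implications",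
--     "legal_hold_check",
--     "audit_trail",
--     "idempotency",
--     "downstream_deletion_propagation",
--     "customer_confirmation",
-- ]
--
-- _SAFEGUARD_ORDER: tuple[DataDeletionSafeguard, ...] = (
--     "dry_run_counts",
--     "cascade_inventory",
--     "backup_restore_implications",
--     "legal_hold_check",
--     "audit_trail",
--     "idempotency",
--     "downstream_deletion_propagation",
--     "customer_confirmation",
-- )
--
-- def _required_safeguards(
--     signals: tuple[DataDeletionSignal, ...],
-- ) -> tuple[DataDeletionSafeguard, ...]:
--     signal_set = set(signals)
--     required: set[DataDeletionSafeguard] = {"dry_run_counts", "legal_hold_check", "audit_trail", "idempotency"}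
--     if signal_set & {"cascading_delete", "account_deletion", "tombstone"}:
--         required.add("cascade_inventory")
--     if signal_set & {"backup_deletion", "purge", "hard_delete", "erasure", "gdpr_deletion"}:
--         required.add("backup_restore_implications")
--     if signal_set & {"search_index_removal", "analytics_removal", "gdpr_deletion", "erasure", "account_deletion"}:
--         required.add("downstream_deletion_propagation")
--     if signal_set & {"account_deletion", "erasure", "gdpr_deletion"}:
--         required.add("customer_confirmation")
--     return tuple(safeguard for safeguard in _SAFEGUARD_ORDER if safeguard in required)
-- ===== SOURCE B (Python) =====
-- _SAFEGUARD_ORDER = (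
--     "dry_run_counts",
--     "cascade_inventory",
--     "backup_restore_implications",
--     "legal_hold_check",
--     "audit_trail",
--     "idempotency",
--     "downstream_deletion_propagation",
--     "customer_confirmation",
-- )
--
-- # Transposed rule table: each signal maps to the safeguards it triggers.
-- _SIGNAL_SAFEGUARDS = {
--     "cascading_delete": ("cascade_inventory",),
--     "tombstone": ("cascade_inventory",),
--     "account_deletion": ("cascade_inventory", "downstream_deletion_propagation", "customer_confirmation"),
--     "backup_deletion": ("backup_restore_implications",),
--     "purge": ("backup_restore_implications",),
--     "hard_delete": ("backup_restore_implications",),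
--     "erasure": ("backup_restore_implications", "downstream_deletion_propagation", "customer_confirmation"),
--     "gdpr_deletion": ("backup_restore_implications", "downstream_deletion_propagation", "customer_confirmation"),
--     "search_index_removal": ("downstream_deletion_propagation",),
--     "analytics_removal": ("downstream_deletion_propagation",),
-- }
--
-- def _required_safeguards(signals):
--     required = {"dry_run_counts", "legal_hold_check", "audit_trail", "idempotency"}
--     for sig in signals:
--         required.update(_SIGNAL_SAFEGUARDS.get(sig, ()))
--     return tuple(safeguard for safeguard in _SAFEGUARD_ORDER if safeguard in required)
-- ===== Notes on version B (the rewrite author's own statement) =====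
-- stated objective: idiomatic
-- what changed: Replaced the four hard-coded set-intersection tests with a transposed signal-to-safeguards lookup table that is folded over the input signals, seeding the four always-required safeguards.
import Mathlib
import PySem

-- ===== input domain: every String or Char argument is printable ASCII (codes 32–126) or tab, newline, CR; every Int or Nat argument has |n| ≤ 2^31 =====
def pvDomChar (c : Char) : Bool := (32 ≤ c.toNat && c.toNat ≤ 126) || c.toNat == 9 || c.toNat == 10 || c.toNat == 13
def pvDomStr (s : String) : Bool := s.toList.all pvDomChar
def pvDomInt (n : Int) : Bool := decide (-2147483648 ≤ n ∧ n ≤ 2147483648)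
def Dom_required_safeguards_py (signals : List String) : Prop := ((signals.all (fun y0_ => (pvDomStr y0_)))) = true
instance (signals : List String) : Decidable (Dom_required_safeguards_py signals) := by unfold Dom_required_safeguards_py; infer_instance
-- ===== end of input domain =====

-- B replaces A's four hand-coded set-intersection tests by a transposed signal→safeguards
-- lookup table folded over the input (objective: idiomatic); same O(n) cost, same result.


-- ===== PORT A =====
-- _SAFEGUARD_ORDER (shared module constant)
def pvSafeguardOrder : List String :=
  ["dry_run_counts", "cascade_inventory", "backup_restore_implications", "legal_hold_check",
   "audit_trail", "idempotency", "downstream_deletion_propagation", "customer_confirmation"]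

def required_safeguards_py (signals : List String) : List String :=
  let signalSet : PySem.Set String := PySem.Set.ofList signals
  let required : PySem.Set String :=
    PySem.Set.ofList ["dry_run_counts", "legal_hold_check", "audit_trail", "idempotency"]
  let required :=
    if PySem.Set.inter signalSet ["cascading_delete", "account_deletion", "tombstone"] ≠ [] then
      PySem.Set.add required "cascade_inventory" else required
  let required :=
    if PySem.Set.inter signalSet ["backup_deletion", "purge", "hard_delete", "erasure", "gdpr_deletion"] ≠ [] then
      PySem.Set.add required "backup_restore_implications" else required
  let required :=
    if PySem.Set.inter signalSet ["search_index_removal", "analytics_removal", "gdpr_deletion", "erasure", "account_deletion"] ≠ [] then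
      PySem.Set.add required "downstream_deletion_propagation" else required
  let required :=
    if PySem.Set.inter signalSet ["account_deletion", "erasure", "gdpr_deletion"] ≠ [] then
      PySem.Set.add required "customer_confirmation" else required
  pvSafeguardOrder.filter (fun safeguard => PySem.Set.contains required safeguard)

-- ===== PORT B =====
-- _SIGNAL_SAFEGUARDS (B's module constant)
def pvSignalSafeguards : PySem.Dict String (List String) :=
  PySem.Dict.ofList
    [("cascading_delete", ["cascade_inventory"]),
     ("tombstone", ["cascade_inventory"]),
     ("account_deletion", ["cascade_inventory", "downstream_deletion_propagation", "customer_confirmation"]),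
     ("backup_deletion", ["backup_restore_implications"]),
     ("purge", ["backup_restore_implications"]),
     ("hard_delete", ["backup_restore_implications"]),
     ("erasure", ["backup_restore_implications", "downstream_deletion_propagation", "customer_confirmation"]),
     ("gdpr_deletion", ["backup_restore_implications", "downstream_deletion_propagation", "customer_confirmation"]),
     ("search_index_removal", ["downstream_deletion_propagation"]),
     ("analytics_removal", ["downstream_deletion_propagation"])]

def required_safeguards_py_alt (signals : List String) : List String :=
  let required : PySem.Set String :=
    signals.foldl
      (fun required signal => PySem.Set.update required (pvSignalSafeguards.getD signal []))
      (PySem.Set.ofList ["dry_run_counts", "legal_hold_check", "audit_trail", "idempotency"])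
  pvSafeguardOrder.filter (fun safeguard => PySem.Set.contains required safeguard)

-- ===== PRECONDITION & SPEC =====
def Spec_required_safeguards_py (signals : List String) (out : List String) : Prop := out = required_safeguards_py_alt signals
instance (signals : List String) (out : List String) : Decidable (Spec_required_safeguards_py signals out) := by unfold Spec_required_safeguards_py; infer_instance

-- ===== CLAIM (what is proved, stated in full; the proofs are below) =====
def Claim_equal_required_safeguards_py : Prop := ∀ (signals : List String), Dom_required_safeguards_py signals → Spec_required_safeguards_py signals (required_safeguards_py signals)

-- ===== LEMMAS AND PROOFS =====

-- membership in B's fold: a safeguard is collected iff it is in the seed or triggered by some signal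
theorem mem_fold_update (signals : List String) (init : PySem.Set String) (x : String) :
    x ∈ signals.foldl
      (fun required signal => PySem.Set.update required (pvSignalSafeguards.getD signal []))
      init ↔ x ∈ init ∨ ∃ s ∈ signals, x ∈ pvSignalSafeguards.getD s [] := by
  induction signals generalizing init with
  | nil => simp
  | cons a l ih =>
    simp only [List.foldl_cons, ih, PySem.Set.mem_update, List.mem_cons]
    constructor
    · rintro ((h | h) | ⟨s, hs, h⟩)
      · exact Or.inl h
      · exact Or.inr ⟨a, Or.inl rfl, h⟩
      · exact Or.inr ⟨s, Or.inr hs, h⟩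
    · rintro (h | ⟨s, (rfl | hs), h⟩)
      · exact Or.inl (Or.inl h)
      · exact Or.inl (Or.inr h)
      · exact Or.inr ⟨s, hs, h⟩

-- A's truthiness test 'signal_set & L' is 'some signal lies in L'
theorem inter_ne_nil (signals L : List String) :
    PySem.Set.inter (PySem.Set.ofList signals) L ≠ [] ↔ ∃ s ∈ signals, s ∈ L := by
  rw [← List.isEmpty_eq_false_iff, List.isEmpty_eq_false_iff_exists_mem]
  constructor
  · rintro ⟨x, hx⟩
    rw [PySem.Set.mem_inter, PySem.Set.mem_ofList] at hx
    exact ⟨x, hx.1, hx.2⟩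
  · rintro ⟨s, hs, hL⟩
    exact ⟨s, by rw [PySem.Set.mem_inter, PySem.Set.mem_ofList]; exact ⟨hs, hL⟩⟩

-- pvSignalSafeguards as its literal association list (keys are distinct)
theorem pvSignalSafeguards_eq : pvSignalSafeguards = PySem.Dict.mk
    [("cascading_delete", ["cascade_inventory"]),
     ("tombstone", ["cascade_inventory"]),
     ("account_deletion", ["cascade_inventory", "downstream_deletion_propagation", "customer_confirmation"]),
     ("backup_deletion", ["backup_restore_implications"]),
     ("purge", ["backup_restore_implications"]),
     ("hard_delete", ["backup_restore_implications"]),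
     ("erasure", ["backup_restore_implications", "downstream_deletion_propagation", "customer_confirmation"]),
     ("gdpr_deletion", ["backup_restore_implications", "downstream_deletion_propagation", "customer_confirmation"]),
     ("search_index_removal", ["downstream_deletion_propagation"]),
     ("analytics_removal", ["downstream_deletion_propagation"])] := by decide

-- the table's rows, read per safeguard
theorem table_cascade (s : String) :
    "cascade_inventory" ∈ pvSignalSafeguards.getD s [] ↔
      s ∈ (["cascading_delete", "account_deletion", "tombstone"] : List String) := by
  rw [pvSignalSafeguards_eq]
  simp only [PySem.Dict.getD, PySem.Dict.get?_mk_cons, beq_iff_eq]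
  split_ifs <;> first | (subst_vars; decide) | simp_all [PySem.Dict.get?, eq_comm]

theorem table_backup (s : String) :
    "backup_restore_implications" ∈ pvSignalSafeguards.getD s [] ↔
      s ∈ (["backup_deletion", "purge", "hard_delete", "erasure", "gdpr_deletion"] : List String) := by
  rw [pvSignalSafeguards_eq]
  simp only [PySem.Dict.getD, PySem.Dict.get?_mk_cons, beq_iff_eq]
  split_ifs <;> first | (subst_vars; decide) | simp_all [PySem.Dict.get?, eq_comm]

theorem table_downstream (s : String) :
    "downstream_deletion_propagation" ∈ pvSignalSafeguards.getD s [] ↔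
      s ∈ (["search_index_removal", "analytics_removal", "gdpr_deletion", "erasure", "account_deletion"] : List String) := by
  rw [pvSignalSafeguards_eq]
  simp only [PySem.Dict.getD, PySem.Dict.get?_mk_cons, beq_iff_eq]
  split_ifs <;> first | (subst_vars; decide) | simp_all [PySem.Dict.get?, eq_comm]

theorem table_customer (s : String) :
    "customer_confirmation" ∈ pvSignalSafeguards.getD s [] ↔
      s ∈ (["account_deletion", "erasure", "gdpr_deletion"] : List String) := by
  rw [pvSignalSafeguards_eq]
  simp only [PySem.Dict.getD, PySem.Dict.get?_mk_cons, beq_iff_eq]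
  split_ifs <;> first | (subst_vars; decide) | simp_all [PySem.Dict.get?, eq_comm]

-- ===== VERDICT (by name: the statement is the Claim_ definition above) =====
set_option maxHeartbeats 2000000 in
theorem required_safeguards_py_spec : Claim_equal_required_safeguards_py := by
  intro signals _
  show required_safeguards_py signals = required_safeguards_py_alt signals
  simp only [required_safeguards_py, required_safeguards_py_alt]
  apply List.filter_congr
  intro g hg
  rw [Bool.eq_iff_iff, PySem.Set.contains_iff, PySem.Set.contains_iff, mem_fold_update]
  simp only [inter_ne_nil]
  fin_cases hg <;>
    [skip; simp only [table_cascade]; simp only [table_backup]; skip; skip; skip;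
     simp only [table_downstream]; simp only [table_customer]] <;>
    split_ifs <;>
    simp_all [PySem.Set.mem_ofList]
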